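-- pv_equiv track=rewrite | github.com/danielcope/code-wars-problems | python/beginner/sum_of_num_from_0_n.py | show_sequence
-- ===== SOURCE A (Python) =====
-- def show_sequence(n):
--     if n < 0:
--         return f'{n}<0'
--     if n == 0:
--         return f'0=0'
--
--     resultsum = 0
--     result = ''
--
--     for i in range(0, n + 1):
--         resultsum += i
--
--         if i == n:
--             result += f'{i}'
--         else:
--             result += f'{i}+'
--
--     return f'{result} = {resultsum}'
-- ===== SOURCE B (Python) =====
-- def show_sequence(n):
--     if n < 0:
--         return f'{n}<0'
--     if n == 0:
--         return '0=0'
--     seq = '+'.join(str(i) for i in range(n + 1))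
--     return f'{seq} = {n * (n + 1) // 2}'
-- ===== Notes on version B (the rewrite author's own statement) =====
-- stated objective: simpler
-- what changed: Replaces the single interleaved loop that accumulates both the running sum and the '+'-separated string with the closed-form Gauss sum n*(n+1)//2 plus one '+'.join over range(n+1).
import Mathlib
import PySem

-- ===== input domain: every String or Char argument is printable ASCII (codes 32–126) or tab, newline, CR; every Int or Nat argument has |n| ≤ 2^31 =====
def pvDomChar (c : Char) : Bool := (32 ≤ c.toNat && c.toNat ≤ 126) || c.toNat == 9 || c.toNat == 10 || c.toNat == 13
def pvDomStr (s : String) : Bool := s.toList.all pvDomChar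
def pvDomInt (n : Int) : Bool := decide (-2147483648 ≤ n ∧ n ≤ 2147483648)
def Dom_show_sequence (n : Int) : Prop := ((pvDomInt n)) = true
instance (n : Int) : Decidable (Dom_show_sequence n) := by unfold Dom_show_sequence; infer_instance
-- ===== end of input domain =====

-- B replaces A's interleaved sum+string loop by the closed-form sum n*(n+1)//2 plus one '+'.join (objective: simpler).

-- ===== PORT A =====
-- A's loop: one pass over range(0, n+1) carrying (resultsum, result).
def show_sequence (n : Int) : String :=
  if n < 0 then String.mk (PySem.Int.toChars n ++ ['<', '0'])
  else if n = 0 then "0=0"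
  else
    let st :=
      (PySem.List.pyRange 0 (n + 1) 1).foldl
        (fun (st : Int × List Char) i =>
          (st.1 + i,
           if i = n then st.2 ++ PySem.Int.toChars i
           else st.2 ++ (PySem.Int.toChars i ++ ['+'])))
        (0, [])
    String.mk (st.2 ++ (' ' :: '=' :: ' ' :: PySem.Int.toChars st.1))

-- ===== PORT B =====
-- B: '+'.join(str(i) for i in range(n+1)) and the closed form n*(n+1)//2.
def show_sequence_alt (n : Int) : String :=
  if n < 0 then String.mk (PySem.Int.toChars n ++ ['<', '0'])
  else if n = 0 then "0=0"
  else
    let seq := PySem.Chars.join ['+'] ((PySem.List.pyRange 0 (n + 1) 1).map PySem.Int.toChars)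
    String.mk (seq ++ (' ' :: '=' :: ' ' :: PySem.Int.toChars (PySem.Int.floordiv (n * (n + 1)) 2)))

-- ===== PRECONDITION & SPEC =====
def Spec_show_sequence (n : Int) (out : String) : Prop := out = show_sequence_alt n
instance (n : Int) (out : String) : Decidable (Spec_show_sequence n out) := by unfold Spec_show_sequence; infer_instance

-- ===== CLAIM (what is proved, stated in full; the proofs are below) =====
def Claim_equal_show_sequence : Prop := ∀ (n : Int), Dom_show_sequence n → Spec_show_sequence n (show_sequence n)

-- ===== LEMMAS AND PROOFS =====

-- A's fold splits into the list sum and the flattened per-element pieces.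
theorem pvFoldSplit (n : Int) (l : List Int) (a : Int) (b : List Char) :
    l.foldl
      (fun (st : Int × List Char) i =>
        (st.1 + i,
         if i = n then st.2 ++ PySem.Int.toChars i
         else st.2 ++ (PySem.Int.toChars i ++ ['+'])))
      (a, b)
    = (a + l.sum,
       b ++ (l.map (fun i => if i = n then PySem.Int.toChars i
                             else PySem.Int.toChars i ++ ['+'])).flatten) := by
  induction l generalizing a b with
  | nil => simp
  | cons x xs ih =>
    simp only [List.foldl_cons, List.map_cons, List.flatten_cons, List.sum_cons]
    by_cases hx : x = n <;>
      simp [hx, ih, List.append_assoc, add_assoc]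

-- Gauss: twice the sum of 0,…,m-1 is m*(m-1).
theorem pvGauss (m : Nat) :
    ((List.range m).map (fun k : Nat => (0:Int) + (k : Int))).sum * 2 = (m:Int) * ((m:Int) - 1) := by
  induction m with
  | zero => simp
  | succ m ih =>
    rw [List.range_succ]
    simp only [List.map_append, List.sum_append, List.map_cons, List.map_nil,
      List.sum_cons, List.sum_nil]
    push_cast
    linear_combination ih

-- '+'.join of the decimal strings equals A's per-element pieces flattened.
theorem pvJoin (n : Int) (k : Nat) : ∀ (a : Int), a ≤ n → (n - a).toNat = k →
    PySem.Chars.join ['+'] ((PySem.List.pyRange a (n + 1) 1).map PySem.Int.toChars)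
      = ((PySem.List.pyRange a (n + 1) 1).map
          (fun i => if i = n then PySem.Int.toChars i
                    else PySem.Int.toChars i ++ ['+'])).flatten := by
  induction k with
  | zero =>
    intro a ha hk
    have : a = n := by omega
    subst this
    rw [PySem.List.pyRange_one_singleton]
    simp [PySem.Chars.join_singleton]
  | succ k ih =>
    intro a ha hk
    have hlt : a < n := by omega
    have h1 : a < n + 1 := by omega
    have h2 : a + 1 < n + 1 := by omega
    have ih' := ih (a + 1) (by omega) (by omega)
    rw [PySem.List.pyRange_one_cons h2] at ih'
    rw [PySem.List.pyRange_one_cons h1, PySem.List.pyRange_one_cons h2]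
    simp only [List.map_cons, List.flatten_cons] at *
    rw [PySem.Chars.join_cons_cons, ih']
    have hne : ¬ (a = n) := by omega
    simp [hne, List.append_assoc]

-- ===== VERDICT (by name: the statement is the Claim_ definition above) =====
theorem show_sequence_spec : Claim_equal_show_sequence := by
  unfold Claim_equal_show_sequence
  intro n _
  unfold Spec_show_sequence show_sequence show_sequence_alt
  by_cases h1 : n < 0
  · simp [h1]
  by_cases h2 : n = 0
  · simp [h2]
  simp only [if_neg h1, if_neg h2]
  have hn : 1 ≤ n := by omega
  rw [pvFoldSplit]
  have hsum : (PySem.List.pyRange 0 (n + 1) 1).sum * 2 = n * (n + 1) := by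
    rw [PySem.List.pyRange_one]
    have hm : (((n + 1 - 0).toNat : Int)) = n + 1 := by omega
    have := pvGauss (n + 1 - 0).toNat
    rw [hm] at this
    linear_combination this
  have hdiv : PySem.Int.floordiv (n * (n + 1)) 2 = (PySem.List.pyRange 0 (n + 1) 1).sum := by
    rw [PySem.Int.floordiv_eq_iff_of_pos (by norm_num)]
    constructor <;> omega
  rw [hdiv, pvJoin n (n - 0).toNat 0 (by omega) rfl]
  simp
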